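-- pv_equiv track=rewrite | github.com/dna-storage/framed | dnastorage/codec/base_conversion.py | decodeWithExclusion
-- ===== SOURCE A (Python) =====
-- from copy import copy
--
-- ibases = ['A', 'C', 'T']
--
-- ivalues = { 'A' : 0 ,
--            'C' : 1 ,
--            'G' : 3 ,
--            'T' : 2   }
--
-- def decodeWithExclusion(s,primer):
--     val = 0
--     power = 1
--     excluded = []
--     plist = [b for b in primer]
--     for i in range(len(primer)):
--         b = copy(ibases)
--         if plist[i]!='G':
--             b.remove(plist[i])
--         excluded.append( { b[i] : i for i in range(len(b)) }  )
--     #print excluded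
--     base = 3
--     for i in range(len(s)):
--         if i < len(excluded):
--             base = len(excluded[i])
--             val += excluded[i][s[i]] * power
--         else:
--             base = 3
--             val += ivalues[s[i]] * power
--         power *= base
--     return val
-- ===== SOURCE B (Python) =====
-- from copy import copy
--
-- ibases = ['A', 'C', 'T']
--
-- ivalues = { 'A' : 0 ,
--            'C' : 1 ,
--            'G' : 3 ,
--            'T' : 2   }
--
-- def _row(p):
--     b = copy(ibases)
--     if p != 'G':
--         b.remove(p)
--     return {b[i]: i for i in range(len(b))}
--
-- def decodeWithExclusion(s, primer):
--     excluded = [_row(p) for p in primer]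
--     # forward pass: per-position (digit, base) pairs (leftmost bad char raises first, as in A)
--     pairs = []
--     for i in range(len(s)):
--         if i < len(excluded):
--             pairs.append((excluded[i][s[i]], len(excluded[i])))
--         else:
--             pairs.append((ivalues[s[i]], 3))
--     # Horner evaluation of the mixed-radix number, most-significant (last) digit first
--     acc = 0
--     for d, b in reversed(pairs):
--         acc = acc * b + d
--     return acc
-- ===== Notes on version B (the rewrite author's own statement) =====
-- stated objective: alternative
-- what changed: Replaces A's running (val, power) place-value accumulator with a forward pass building per-position (digit, base) pairs followed by a reverse Horner fold.
import Mathlib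
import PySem

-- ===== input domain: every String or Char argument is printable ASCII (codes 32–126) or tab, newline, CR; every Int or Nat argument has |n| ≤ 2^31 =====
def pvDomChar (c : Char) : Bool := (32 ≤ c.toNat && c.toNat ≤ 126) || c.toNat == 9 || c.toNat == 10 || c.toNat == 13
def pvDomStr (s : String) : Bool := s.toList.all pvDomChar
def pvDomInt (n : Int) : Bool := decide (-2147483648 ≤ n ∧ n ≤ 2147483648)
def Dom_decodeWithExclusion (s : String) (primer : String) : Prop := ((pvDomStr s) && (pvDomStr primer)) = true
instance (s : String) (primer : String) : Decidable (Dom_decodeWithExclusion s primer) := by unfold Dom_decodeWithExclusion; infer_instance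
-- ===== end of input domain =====

-- B replaces A's running place-value accumulator (val, power) with a forward digit/base
-- pass followed by a reverse Horner fold — a different decomposition of the same value
-- (objective: alternative, same cost).

-- shared module context: ivalues and the per-primer-char exclusion dict (identical code in A and B)
def pvIvalues : PySem.Dict Char Int := PySem.Dict.ofList [('A', 0), ('C', 1), ('G', 3), ('T', 2)]

-- b = copy(ibases); if p != 'G': b.remove(p); { b[i] : i for i in range(len(b)) }
def pvRow (p : Char) : PySem.Dict Char Int :=
  let b : List Char := if p ≠ 'G' then (PySem.List.remove? ['A', 'C', 'T'] p).getD ['A', 'C', 'T'] else ['A', 'C', 'T']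
  (List.range b.length).foldl (fun d i => PySem.Dict.insert d (b.getD i 'A') (i : Int)) PySem.Dict.empty

-- ===== PORT A =====
-- the main for-loop of A: state (val, power); 'i < len(excluded)' becomes the remaining-dicts case split
def pvLoopA : List Char → List (PySem.Dict Char Int) → Int → Int → Int
  | [], _, val, _ => val
  | c :: cs, d :: ds, val, power =>
      pvLoopA cs ds (val + (PySem.Dict.getD d c 0) * power) (power * (PySem.Dict.size d : Int))
  | c :: cs, [], val, power =>
      pvLoopA cs [] (val + (PySem.Dict.getD pvIvalues c 0) * power) (power * 3)

def decodeWithExclusion (s : String) (primer : String) : Int :=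
  let excluded := primer.toList.foldl (fun acc p => acc ++ [pvRow p]) []
  pvLoopA s.toList excluded 0 1

-- ===== PORT B =====
-- forward pass: the list of (digit, base) pairs
def pvPairs : List Char → List (PySem.Dict Char Int) → List (Int × Int)
  | [], _ => []
  | c :: cs, d :: ds => (PySem.Dict.getD d c 0, (PySem.Dict.size d : Int)) :: pvPairs cs ds
  | c :: cs, [] => (PySem.Dict.getD pvIvalues c 0, 3) :: pvPairs cs []

def decodeWithExclusion_alt (s : String) (primer : String) : Int :=
  let excluded := primer.toList.map pvRow
  -- Horner fold over reversed(pairs): acc = acc * base + digit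
  (pvPairs s.toList excluded).foldr (fun p acc => acc * p.2 + p.1) 0

-- ===== PRECONDITION & SPEC =====
def pvAllowed (pc : Char) : List Char :=
  if pc = 'G' then ['A', 'C', 'T'] else (['A', 'C', 'T'].filter (fun c => c ≠ pc))

-- Pre_ excludes exactly the inputs where Python A raises: a primer character outside
-- 'ACGT' (ValueError from list.remove) or a character of s absent from its position's
-- lookup dict (KeyError).
def Pre_decodeWithExclusion (s : String) (primer : String) : Prop :=
  (primer.toList.all (fun c => ['A', 'C', 'G', 'T'].contains c)
    && s.toList.zipIdx.all (fun ci =>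
         (if ci.2 < primer.toList.length then pvAllowed (primer.toList.getD ci.2 'X')
          else ['A', 'C', 'G', 'T']).contains ci.1)) = true

instance (s : String) (primer : String) : Decidable (Pre_decodeWithExclusion s primer) := by
  unfold Pre_decodeWithExclusion; infer_instance

def pvWitness_decodeWithExclusion : String × String := ("ACTG", "GAA")

def Spec_decodeWithExclusion (s : String) (primer : String) (out : Int) : Prop := out = decodeWithExclusion_alt s primer
instance (s : String) (primer : String) (out : Int) : Decidable (Spec_decodeWithExclusion s primer out) := by unfold Spec_decodeWithExclusion; infer_instance

-- ===== CLAIM (what is proved, stated in full; the proofs are below) =====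
def Claim_equal_decodeWithExclusion : Prop := ∀ (s : String) (primer : String), Dom_decodeWithExclusion s primer → Pre_decodeWithExclusion s primer → Spec_decodeWithExclusion s primer (decodeWithExclusion s primer)

-- ===== LEMMAS AND PROOFS =====

-- A's accumulator loop computes the Horner value of B's digit/base pairs, shifted by (val, power)
theorem pvLoopA_eq_horner (cs : List Char) :
    ∀ (ds : List (PySem.Dict Char Int)) (val power : Int),
      pvLoopA cs ds val power =
        val + power * (pvPairs cs ds).foldr (fun p acc => acc * p.2 + p.1) 0 := by
  induction cs with
  | nil => intro ds val power; simp [pvLoopA, pvPairs]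
  | cons c cs ih =>
    intro ds val power
    cases ds with
    | nil => simp [pvLoopA, pvPairs, ih]; ring
    | cons d ds => simp [pvLoopA, pvPairs, ih]; ring

-- ===== VERDICT (by name: the statement is the Claim_ definition above) =====
theorem decodeWithExclusion_spec : Claim_equal_decodeWithExclusion := by
  intro s primer _ _
  unfold Spec_decodeWithExclusion decodeWithExclusion decodeWithExclusion_alt
  rw [PySem.List.foldl_append_singleton_eq_map, List.nil_append, pvLoopA_eq_horner]
  ring
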